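-- pv_equiv track=rewrite | github.com/PatienceQi/sge_lightrag | stage2/inducer.py | _assign_column_roles_flat
-- ===== SOURCE A (Python) =====
-- def _assign_column_roles_flat(
--     raw_columns: list[str],
--     subject_cols: list[str],
--     value_cols: list[str],
--     remarks_cols: list[str],
--     time_cols: list[str],
-- ) -> dict[str, str]:
--     """
--     Assign a role string to every column.
--
--     Roles: "subject" | "time_value" | "value" | "metadata" | "unknown"
--     """
--     roles: dict[str, str] = {}
--     for col in raw_columns:
--         if col in subject_cols:
--             roles[col] = "subject"
--         elif col in time_cols:
--             roles[col] = "time_value"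
--         elif col in remarks_cols:
--             roles[col] = "metadata"
--         elif col in value_cols:
--             roles[col] = "value"
--         else:
--             roles[col] = "unknown"
--     return roles
-- ===== SOURCE B (Python) =====
-- def _assign_column_roles_flat(
--     raw_columns: list[str],
--     subject_cols: list[str],
--     value_cols: list[str],
--     remarks_cols: list[str],
--     time_cols: list[str],
-- ) -> dict[str, str]:
--     """Precompute a role table (reverse-priority order so higher priority
--     overwrites), then one flat lookup pass over raw_columns."""
--     lookup: dict[str, str] = {}
--     for col in value_cols:
--         lookup[col] = "value"
--     for col in remarks_cols:
--         lookup[col] = "metadata"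
--     for col in time_cols:
--         lookup[col] = "time_value"
--     for col in subject_cols:
--         lookup[col] = "subject"
--     return {col: lookup.get(col, "unknown") for col in raw_columns}
-- ===== Notes on version B (the rewrite author's own statement) =====
-- stated objective: faster
-- what changed: Replaces the per-column four-way linear membership chain with a role table built once from the four category lists (in reverse-priority order so higher priority overwrites) followed by a single hash lookup per column.
import Mathlib
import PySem

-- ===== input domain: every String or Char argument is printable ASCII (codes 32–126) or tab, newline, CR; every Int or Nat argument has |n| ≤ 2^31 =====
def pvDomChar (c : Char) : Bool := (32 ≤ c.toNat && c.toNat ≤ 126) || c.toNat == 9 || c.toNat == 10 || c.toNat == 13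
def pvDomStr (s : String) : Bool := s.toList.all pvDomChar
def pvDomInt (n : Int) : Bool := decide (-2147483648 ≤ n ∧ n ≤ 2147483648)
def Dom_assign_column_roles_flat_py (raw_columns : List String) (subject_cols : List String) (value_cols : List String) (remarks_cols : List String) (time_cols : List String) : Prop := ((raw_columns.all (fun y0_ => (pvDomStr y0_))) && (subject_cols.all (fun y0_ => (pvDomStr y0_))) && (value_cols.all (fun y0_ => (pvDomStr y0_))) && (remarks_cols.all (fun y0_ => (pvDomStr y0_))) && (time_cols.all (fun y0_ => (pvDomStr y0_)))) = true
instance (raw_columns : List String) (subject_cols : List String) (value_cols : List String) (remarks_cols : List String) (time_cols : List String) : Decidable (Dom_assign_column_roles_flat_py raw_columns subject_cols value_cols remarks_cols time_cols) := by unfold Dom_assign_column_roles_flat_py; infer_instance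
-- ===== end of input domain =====

-- ===== PORT A =====
-- B replaces A's per-column four-way membership chain by a precomputed role table plus a flat lookup pass (faster in a timing run).
def assign_column_roles_flat_py (raw_columns : List String) (subject_cols : List String) (value_cols : List String) (remarks_cols : List String) (time_cols : List String) : List (String × String) :=
  (raw_columns.foldl (fun roles col =>
      if subject_cols.contains col then roles.insert col "subject"
      else if time_cols.contains col then roles.insert col "time_value"
      else if remarks_cols.contains col then roles.insert col "metadata"
      else if value_cols.contains col then roles.insert col "value"
      else roles.insert col "unknown")
    (PySem.Dict.empty)).items

-- ===== PORT B =====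
def assign_column_roles_flat_py_alt (raw_columns : List String) (subject_cols : List String) (value_cols : List String) (remarks_cols : List String) (time_cols : List String) : List (String × String) :=
  let lookup0 := value_cols.foldl (fun d col => d.insert col "value") (PySem.Dict.empty)
  let lookup1 := remarks_cols.foldl (fun d col => d.insert col "metadata") lookup0
  let lookup2 := time_cols.foldl (fun d col => d.insert col "time_value") lookup1
  let lookup := subject_cols.foldl (fun d col => d.insert col "subject") lookup2
  (raw_columns.foldl (fun d col => d.insert col (lookup.getD col "unknown")) (PySem.Dict.empty)).items

-- ===== PRECONDITION & SPEC =====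
def Spec_assign_column_roles_flat_py (raw_columns : List String) (subject_cols : List String) (value_cols : List String) (remarks_cols : List String) (time_cols : List String) (out : List (String × String)) : Prop := out = assign_column_roles_flat_py_alt raw_columns subject_cols value_cols remarks_cols time_cols
instance (raw_columns : List String) (subject_cols : List String) (value_cols : List String) (remarks_cols : List String) (time_cols : List String) (out : List (String × String)) : Decidable (Spec_assign_column_roles_flat_py raw_columns subject_cols value_cols remarks_cols time_cols out) := by unfold Spec_assign_column_roles_flat_py; infer_instance

-- ===== CLAIM (what is proved, stated in full; the proofs are below) =====
def Claim_equal_assign_column_roles_flat_py : Prop := ∀ (raw_columns : List String) (subject_cols : List String) (value_cols : List String) (remarks_cols : List String) (time_cols : List String), Dom_assign_column_roles_flat_py raw_columns subject_cols value_cols remarks_cols time_cols → Spec_assign_column_roles_flat_py raw_columns subject_cols value_cols remarks_cols time_cols (assign_column_roles_flat_py raw_columns subject_cols value_cols remarks_cols time_cols)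

-- ===== LEMMAS AND PROOFS =====

-- ===== VERDICT (by name: the statement is the Claim_ definition above) =====
lemma getD_foldl_insert_const (xs : List String) (v d0 : String) (d : PySem.Dict String String) (c : String) :
    (xs.foldl (fun d k => d.insert k v) d).getD c d0 = if xs.contains c then v else d.getD c d0 := by
  induction xs generalizing d with
  | nil => simp
  | cons x xs ih =>
    simp only [List.foldl_cons, ih, PySem.Dict.getD_insert, List.contains_cons]
    by_cases hx : c = x <;> simp [hx]

theorem assign_column_roles_flat_py_spec : Claim_equal_assign_column_roles_flat_py := by
  intro raw_columns subject_cols value_cols remarks_cols time_cols _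
  unfold Spec_assign_column_roles_flat_py
  unfold assign_column_roles_flat_py assign_column_roles_flat_py_alt
  simp only []
  congr 1
  apply PySem.List.foldl_congr_mem
  intro d col _
  simp only [getD_foldl_insert_const, PySem.Dict.getD_empty]
  split_ifs <;> rfl
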